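-- pv_equiv track=rewrite | github.com/spycyyyy/Graph-Command-Line-Interface-GCLI | apls/graph_cli.py | fmt_edges
-- ===== SOURCE A (Python) =====
-- from collections import defaultdict, deque
--
-- def fmt_edges(ed):
--     grouped = defaultdict(list)
--     for n, v in ed.items():
--         try:
--             i, j, eid = map(int, n.split("_"))
--         except ValueError:
--             continue
--         grouped[(i, j)].append((eid, v))
--
--     if not grouped:
--         return "[INFO] no edges"
--
--     lines = []
--     checked = []
--     for (i, j), items in sorted(grouped.items()):
--         items.sort()
--         inside = " , ".join(f"{eid}: {val}" for eid, val in items)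
--         if i not in checked:
--             lines.append(f"{i} -> {j}: [ {inside} ]")
--             checked.append(i)
--         else:
--             lines.append(f"-> {j}: [ {inside} ]")
--     return "\n".join(lines)
-- ===== SOURCE B (Python) =====
-- def _parse(n):
--     parts = n.split("_")
--     if len(parts) != 3:
--         return None
--     try:
--         return (int(parts[0]), int(parts[1]), int(parts[2]))
--     except ValueError:
--         return None
--
--
-- def fmt_edges(ed):
--     # flat list of (i, j, eid, val) records; one full sort replaces
--     # A's dict-of-lists grouping + per-group sorts + 'checked' list
--     quads = sorted((*t, v) for n, v in ed.items() if (t := _parse(n)) is not None)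
--     if not quads:
--         return "[INFO] no edges"
--     parts = []
--     prev = None
--     for i, j, eid, v in quads:
--         piece = f"{eid}: {v}"
--         if prev == (i, j):
--             parts.append(f" , {piece}")
--         elif prev is None:
--             parts.append(f"{i} -> {j}: [ {piece}")
--         elif prev[0] == i:
--             parts.append(f" ]\n-> {j}: [ {piece}")
--         else:
--             parts.append(f" ]\n{i} -> {j}: [ {piece}")
--         prev = (i, j)
--     return "".join(parts) + " ]"
-- ===== Notes on version B (the rewrite author's own statement) =====
-- stated objective: faster
-- what changed: B replaces A's defaultdict-of-lists grouping, per-group sorts and the growing 'checked' membership list by one flat list of (i, j, eid, val) records, a single lexicographic sort, and one streaming pass that tracks only the previous (i, j) pair.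
import Mathlib
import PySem

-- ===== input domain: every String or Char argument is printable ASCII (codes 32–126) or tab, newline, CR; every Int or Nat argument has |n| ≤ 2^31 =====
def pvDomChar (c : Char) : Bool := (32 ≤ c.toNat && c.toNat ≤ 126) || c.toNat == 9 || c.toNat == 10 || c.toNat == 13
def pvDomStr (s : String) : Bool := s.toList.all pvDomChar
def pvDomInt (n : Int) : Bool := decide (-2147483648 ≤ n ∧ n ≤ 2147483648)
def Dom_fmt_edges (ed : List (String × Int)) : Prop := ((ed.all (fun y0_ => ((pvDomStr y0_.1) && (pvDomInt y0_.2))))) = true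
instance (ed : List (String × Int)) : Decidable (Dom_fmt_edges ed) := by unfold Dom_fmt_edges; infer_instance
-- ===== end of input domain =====

-- B replaces A's dict-of-lists + per-group sorts + 'checked' membership list by one flat
-- record list, a single sort, and one streaming pass (measured faster in a timing run).

-- ===== PORT A =====
-- i, j, eid = map(int, n.split("_")) guarded by 'except ValueError: continue':
-- the entry survives iff the split has exactly 3 parts and all three are int-parseable
-- (fewer/more parts raise ValueError at the unpack, a bad part raises it at int()).
-- splitOn is exact here because the separator "_" is nonempty.
def pvParseA (n : String) : Option (Int × Int × Int) :=
  match PySem.Chars.splitOn n.toList ['_'] with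
  | [a, b, c] =>
    match PySem.Int.ofChars? a, PySem.Int.ofChars? b, PySem.Int.ofChars? c with
    | some i, some j, some e => some (i, j, e)
    | _, _, _ => none
  | _ => none

-- sorted(grouped.items()) compares pairs ((i, j), items); the keys (i, j) are distinct
-- (dict keys), so Python never compares the list components: the sort is by the key tuple.
-- one iteration of A's display loop (st = (lines, checked), g = ((i, j), items))
def pvStepA (st : List String × List Int) (g : (Int × Int) × List (Int × Int)) :
    List String × List Int :=
  let items := PySem.List.sorted2 g.2 (fun p => p.1) (fun p => p.2)
  let inside := PySem.Str.join " , "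
    (items.map (fun p => PySem.Int.toStr p.1 ++ ": " ++ PySem.Int.toStr p.2))
  if !(st.2.contains g.1.1) then
    (st.1 ++ [PySem.Int.toStr g.1.1 ++ " -> " ++ PySem.Int.toStr g.1.2 ++ ": [ " ++ inside ++ " ]"],
     st.2 ++ [g.1.1])
  else
    (st.1 ++ ["-> " ++ PySem.Int.toStr g.1.2 ++ ": [ " ++ inside ++ " ]"], st.2)

def fmt_edges (ed : List (String × Int)) : String :=
  let grouped : PySem.Dict (Int × Int) (List (Int × Int)) :=
    ed.foldl (fun d nv =>
      match pvParseA nv.1 with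
      | some (i, j, eid) => d.modify (i, j) [] (fun xs => xs ++ [(eid, nv.2)])
      | none => d) PySem.Dict.empty
  if grouped.items = [] then "[INFO] no edges"
  else
    let st := (PySem.List.sorted2 grouped.items (fun g => g.1.1) (fun g => g.1.2)).foldl
      pvStepA ([], [])
    PySem.Str.join "\n" st.1

-- ===== PORT B =====
-- B's helper _parse(n): same acceptance condition, written as the same match
def pvParseB (n : String) : Option (Int × Int × Int) :=
  match PySem.Chars.splitOn n.toList ['_'] with
  | [a, b, c] =>
    match PySem.Int.ofChars? a, PySem.Int.ofChars? b, PySem.Int.ofChars? c with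
    | some i, some j, some e => some (i, j, e)
    | _, _, _ => none
  | _ => none

-- sorted(...) on 4-tuples compares lexicographically: key into nested Lex pairs
def pvKey4 (q : Int × Int × Int × Int) : Lex (Int × Lex (Int × Lex (Int × Int))) :=
  toLex (q.1, toLex (q.2.1, toLex (q.2.2.1, q.2.2.2)))

-- B's loop tests 'prev == (i, j)' before 'prev is None'; None never equals a tuple,
-- so matching on the Option first is the same test order.
-- one iteration of B's streaming loop (st = (parts, prev), q = (i, j, eid, v))
def pvStepB (st : List String × Option (Int × Int)) (q : Int × Int × Int × Int) :
    List String × Option (Int × Int) :=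
  let piece := PySem.Int.toStr q.2.2.1 ++ ": " ++ PySem.Int.toStr q.2.2.2
  let part :=
    match st.2 with
    | some p =>
      if p = (q.1, q.2.1) then " , " ++ piece
      else if p.1 = q.1 then " ]\n-> " ++ PySem.Int.toStr q.2.1 ++ ": [ " ++ piece
      else " ]\n" ++ PySem.Int.toStr q.1 ++ " -> " ++ PySem.Int.toStr q.2.1 ++ ": [ " ++ piece
    | none => PySem.Int.toStr q.1 ++ " -> " ++ PySem.Int.toStr q.2.1 ++ ": [ " ++ piece
  (st.1 ++ [part], some (q.1, q.2.1))

def fmt_edges_alt (ed : List (String × Int)) : String :=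
  let quads := PySem.List.sorted
    (ed.filterMap (fun nv => (pvParseB nv.1).map (fun t => (t.1, t.2.1, t.2.2, nv.2))))
    pvKey4
  if quads = [] then "[INFO] no edges"
  else
    let st := quads.foldl pvStepB ([], none)
    PySem.Str.join "" st.1 ++ " ]"

-- ===== PRECONDITION & SPEC =====
def Spec_fmt_edges (ed : List (String × Int)) (out : String) : Prop := out = fmt_edges_alt ed
instance (ed : List (String × Int)) (out : String) : Decidable (Spec_fmt_edges ed out) := by unfold Spec_fmt_edges; infer_instance

-- ===== CLAIM (what is proved, stated in full; the proofs are below) =====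
def Claim_equal_fmt_edges : Prop := ∀ (ed : List (String × Int)), Dom_fmt_edges ed → Spec_fmt_edges ed (fmt_edges ed)

-- ===== LEMMAS AND PROOFS =====

theorem pvParse_eq : pvParseB = pvParseA := rfl

-- the parsed records, as (key, payload) pairs: ((i, j), (eid, v))
def pvP (ed : List (String × Int)) : List ((Int × Int) × (Int × Int)) :=
  ed.filterMap (fun nv => (pvParseA nv.1).map (fun t => ((t.1, t.2.1), (t.2.2, nv.2))))

def pvEmb (p : (Int × Int) × (Int × Int)) : Int × Int × Int × Int := (p.1.1, p.1.2, p.2.1, p.2.2)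

def pvKeyK (k : Int × Int) : Lex (Int × Int) := toLex k
def pvKeyV (v : Int × Int) : Lex (Int × Int) := toLex v
def pvPKey (p : (Int × Int) × (Int × Int)) : Lex (Int × Lex (Int × Lex (Int × Int))) := pvKey4 (pvEmb p)

def pvFiber (P : List ((Int × Int) × (Int × Int))) (k : Int × Int) : List (Int × Int) :=
  (P.filter (fun p => p.1 == k)).map (fun p => p.2)

def pvSK (P : List ((Int × Int) × (Int × Int))) : List (Int × Int) :=
  PySem.List.sorted (PySem.Set.ofList (P.map (fun p => p.1))) pvKeyK

def pvGS (P : List ((Int × Int) × (Int × Int))) : List ((Int × Int) × List (Int × Int)) :=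
  (pvSK P).map (fun k => (k, PySem.List.sorted (pvFiber P k) pvKeyV))

def pvPiece (v : Int × Int) : String := PySem.Int.toStr v.1 ++ ": " ++ PySem.Int.toStr v.2

def pvInside (its : List (Int × Int)) : String := PySem.Str.join " , " (its.map pvPiece)

def pvFlat (GS : List ((Int × Int) × List (Int × Int))) : List (Int × Int × Int × Int) :=
  GS.flatMap (fun g => g.2.map (fun v => (g.1.1, g.1.2, v.1, v.2)))

-- A's line generation, with the inner sort already performed
def pvGenA : List Int → List ((Int × Int) × List (Int × Int)) → List String
  | _, [] => []
  | checked, g :: rest =>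
    if !(checked.contains g.1.1) then
      (PySem.Int.toStr g.1.1 ++ " -> " ++ PySem.Int.toStr g.1.2 ++ ": [ " ++ pvInside g.2 ++ " ]") ::
        pvGenA (checked ++ [g.1.1]) rest
    else
      ("-> " ++ PySem.Int.toStr g.1.2 ++ ": [ " ++ pvInside g.2 ++ " ]") :: pvGenA checked rest

-- B's part generation
def pvGenB : Option (Int × Int) → List (Int × Int × Int × Int) → List String
  | _, [] => []
  | prev, q :: rest =>
    let piece := pvPiece (q.2.2.1, q.2.2.2)
    let part :=
      match prev with
      | some p =>
        if p = (q.1, q.2.1) then " , " ++ piece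
        else if p.1 = q.1 then " ]\n-> " ++ PySem.Int.toStr q.2.1 ++ ": [ " ++ piece
        else " ]\n" ++ PySem.Int.toStr q.1 ++ " -> " ++ PySem.Int.toStr q.2.1 ++ ": [ " ++ piece
      | none => PySem.Int.toStr q.1 ++ " -> " ++ PySem.Int.toStr q.2.1 ++ ": [ " ++ piece
    part :: pvGenB (some (q.1, q.2.1)) rest

-- ---- string kit ----
theorem pv_join_nil (s : String) : PySem.Str.join s [] = "" := by
  apply String.ext; simp [PySem.Str.toList_join, PySem.Chars.join, List.intercalate]

theorem pv_join_singleton (s a : String) : PySem.Str.join s [a] = a := by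
  apply String.ext; simp [PySem.Str.toList_join, PySem.Chars.join, List.intercalate]

theorem pv_join_cons (s a b : String) (l : List String) :
    PySem.Str.join s (a :: b :: l) = a ++ s ++ PySem.Str.join s (b :: l) := by
  apply String.ext
  simp [PySem.Str.toList_join, PySem.Chars.join, List.intercalate]

theorem pv_join_empty_cons (a : String) (l : List String) :
    PySem.Str.join "" (a :: l) = a ++ PySem.Str.join "" l := by
  cases l with
  | nil => simp [pv_join_singleton, pv_join_nil]
  | cons b t => rw [pv_join_cons]; simp

theorem pv_join_empty_append (l₁ l₂ : List String) :
    PySem.Str.join "" (l₁ ++ l₂) = PySem.Str.join "" l₁ ++ PySem.Str.join "" l₂ := by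
  induction l₁ with
  | nil => simp [pv_join_nil]
  | cons a t ih => simp [pv_join_empty_cons, ih, String.append_assoc]

-- ---- sorted2 is sorted with a lexicographic key ----
theorem pv_insertBy_congr {α : Type} (b b' : α → α → Bool) (h : ∀ x y, b x y = b' x y)
    (x : α) : ∀ l, PySem.List.insertBy b x l = PySem.List.insertBy b' x l := by
  intro l
  induction l with
  | nil => simp [PySem.List.insertBy]
  | cons y ys ih => simp [PySem.List.insertBy, h x y, ih]

theorem pv_sorted2_eq_sorted {α : Type} (xs : List α) (k1 k2 : α → Int) :
    PySem.List.sorted2 xs k1 k2 = PySem.List.sorted xs (fun a => toLex (k1 a, k2 a)) := by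
  show xs.foldl (fun acc x => PySem.List.insertBy _ x acc) [] =
    xs.foldl (fun acc x => PySem.List.insertBy _ x acc) []
  apply PySem.List.foldl_congr_mem
  intro acc x _
  apply pv_insertBy_congr
  intro p q
  simp only [Prod.Lex.toLex_lt_toLex]
  rcases lt_trichotomy (k1 p) (k1 q) with h | h | h
  · simp [h]
  · simp [h]
  · have h1 : ¬ k1 p < k1 q := by omega
    have h2 : ¬ k1 p = k1 q := by omega
    simp [h, h1, h2]

theorem pv_insertBy_map {α β : Type} (f : α → β) (b : β → β → Bool) (x : α) :
    ∀ l : List α, PySem.List.insertBy b (f x) (l.map f) =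
      (PySem.List.insertBy (fun p q => b (f p) (f q)) x l).map f := by
  intro l
  induction l with
  | nil => simp [PySem.List.insertBy]
  | cons y ys ih =>
    simp only [List.map_cons, PySem.List.insertBy]
    by_cases h : b (f x) (f y) = true <;> simp [h, ih]

theorem pv_foldl_insertBy_map {α β : Type} (f : α → β) (b : β → β → Bool) :
    ∀ (xs l : List α),
      (xs.map f).foldl (fun acc y => PySem.List.insertBy b y acc) (l.map f) =
        (xs.foldl (fun acc y => PySem.List.insertBy (fun p q => b (f p) (f q)) y acc) l).map f := by
  intro xs
  induction xs with
  | nil => intro l; simp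
  | cons x t ih =>
    intro l
    simp only [List.map_cons, List.foldl_cons]
    rw [pv_insertBy_map f b x l, ih]

theorem pv_sorted_map {α β κ : Type} [LT κ] [DecidableLT κ] (f : α → β) (key : β → κ)
    (xs : List α) :
    PySem.List.sorted (xs.map f) key = (PySem.List.sorted xs (fun x => key (f x))).map f := by
  show (xs.map f).foldl (fun acc y => PySem.List.insertBy _ y acc) [] = _
  have := pv_foldl_insertBy_map f (fun p q => decide (key p < key q)) xs []
  simpa using this

-- ---- A's grouping dict, characterised ----
theorem pv_foldA_dict (ed : List (String × Int)) :
    ∀ d : PySem.Dict (Int × Int) (List (Int × Int)),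
      ed.foldl (fun d nv =>
        match pvParseA nv.1 with
        | some (i, j, eid) => d.modify (i, j) [] (fun xs => xs ++ [(eid, nv.2)])
        | none => d) d
      = (pvP ed).foldl (fun d p => d.modify p.1 [] (fun xs => xs ++ [p.2])) d := by
  induction ed with
  | nil => intro d; simp [pvP]
  | cons nv t ih =>
    intro d
    rcases h : pvParseA nv.1 with _ | ⟨i, j, e⟩ <;>
      simp only [pvP, List.foldl_cons, List.filterMap_cons, h, Option.map_some,
        Option.map_none] <;> exact ih _

theorem pv_grouped_items (ed : List (String × Int)) :
    ((pvP ed).foldl (fun d p => d.modify p.1 [] (fun xs => xs ++ [p.2]))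
        (PySem.Dict.empty : PySem.Dict (Int × Int) (List (Int × Int)))).items
      = (PySem.Set.ofList ((pvP ed).map (fun p => p.1))).map
          (fun k => (k, pvFiber (pvP ed) k)) := by
  have hshape : ((pvP ed).foldl (fun d p => d.modify p.1 [] (fun xs => xs ++ [p.2]))
      (PySem.Dict.empty : PySem.Dict (Int × Int) (List (Int × Int))))
      = (pvP ed).foldl (fun d x => d.modify ((fun p => p.1) x) []
          ((fun (_ : PySem.Dict (Int × Int) (List (Int × Int))) (x : ((Int × Int) × (Int × Int))) (xs : List (Int × Int)) => xs ++ [x.2]) d x)) PySem.Dict.empty := rfl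
  have hnd : ((pvP ed).foldl (fun d p => d.modify p.1 [] (fun xs => xs ++ [p.2]))
      (PySem.Dict.empty : PySem.Dict (Int × Int) (List (Int × Int)))).keys.Nodup := by
    rw [hshape]
    exact PySem.Dict.nodup_keys_foldl_modify_key _ _ _ _ _ PySem.Dict.nodup_keys_empty
  rw [PySem.Dict.items_eq_map_keys _ hnd []]
  have hkeys : ((pvP ed).foldl (fun d p => d.modify p.1 [] (fun xs => xs ++ [p.2]))
      (PySem.Dict.empty : PySem.Dict (Int × Int) (List (Int × Int)))).keys
      = PySem.Set.ofList ((pvP ed).map (fun p => p.1)) := by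
    rw [hshape, PySem.Dict.keys_foldl_modify_key]
    rfl
  rw [hkeys]
  apply List.map_congr_left
  intro k _
  have := PySem.Dict.getD_foldl_modify_append (pvP ed)
    (PySem.Dict.empty : PySem.Dict (Int × Int) (List (Int × Int))) k
  simp [PySem.Dict.getD_empty] at this
  simp [this, pvFiber]

theorem pv_ofList_eq_nil {α : Type} [BEq α] [LawfulBEq α] (xs : List α) :
    PySem.Set.ofList xs = [] ↔ xs = [] := by
  constructor
  · intro h
    cases xs with
    | nil => rfl
    | cons x t =>
      exfalso
      have : x ∈ PySem.Set.ofList (x :: t) := (PySem.Set.mem_ofList _ _).2 (by simp)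
      simp [h] at this
  · rintro rfl; rfl


-- ---- B's quads are the embedded records ----
theorem pv_quads (ed : List (String × Int)) :
    ed.filterMap (fun nv => (pvParseB nv.1).map (fun t => (t.1, t.2.1, t.2.2, nv.2)))
      = (pvP ed).map pvEmb := by
  rw [pvParse_eq]
  simp only [pvP, List.map_filterMap]
  apply List.filterMap_congr
  intro nv _
  rcases h : pvParseA nv.1 with _ | ⟨i, j, e⟩ <;> simp [pvEmb]

-- ---- key partition permutation ----
theorem pv_perm_partition :
    ∀ (ks : List (Int × Int)) (P : List ((Int × Int) × (Int × Int))),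
      ks.Nodup → (∀ p ∈ P, p.1 ∈ ks) →
      (ks.flatMap (fun k => P.filter (fun p => p.1 == k))).Perm P := by
  intro ks
  induction ks with
  | nil =>
    intro P _ hcov
    cases P with
    | nil => simp
    | cons p t => exact absurd (hcov p (by simp)) (by simp)
  | cons k t ih =>
    intro P hnd hcov
    have hkt : k ∉ t := by simp [List.nodup_cons] at hnd; exact hnd.1
    have hndt : t.Nodup := by simp [List.nodup_cons] at hnd; exact hnd.2
    rw [List.flatMap_cons]
    have hrw : t.flatMap (fun k' => P.filter (fun p => p.1 == k'))
        = t.flatMap (fun k' => (P.filter (fun p => !(p.1 == k))).filter (fun p => p.1 == k')) := by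
      apply List.flatMap_congr
      intro k' hk'
      rw [List.filter_filter]
      apply List.filter_congr
      intro p _
      by_cases h : p.1 = k'
      · have hne : ¬ p.1 = k := by rintro rfl; exact hkt (h ▸ hk')
        have hkk : (k' == k) = false := beq_eq_false_iff_ne.2 (fun hh => hne (h.trans hh))
        simp [h, hkk]
      · simp [h]
    rw [hrw]
    have hcov' : ∀ p ∈ P.filter (fun p => !(p.1 == k)), p.1 ∈ t := by
      intro p hp
      rw [List.mem_filter] at hp
      have := hcov p hp.1
      simp at this hp
      rcases this with h | h
      · exact absurd h hp.2
      · exact h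
    have := ih (P.filter (fun p => !(p.1 == k))) hndt hcov'
    exact (List.Perm.append_left _ this).trans (List.filter_append_perm _ P)

-- ---- lex-key arithmetic ----
theorem pv_pkey_inj : Function.Injective pvPKey := by
  rintro ⟨⟨a1, a2⟩, ⟨a3, a4⟩⟩ ⟨⟨b1, b2⟩, ⟨b3, b4⟩⟩ h
  simp [pvPKey, pvKey4, pvEmb, Prod.ext_iff] at h
  simp [h]

theorem pv_pkey_le_same (k v v') (h : pvKeyV v ≤ pvKeyV v') :
    pvPKey (k, v) ≤ pvPKey (k, v') := by
  obtain ⟨k1, k2⟩ := k; obtain ⟨v1, v2⟩ := v; obtain ⟨w1, w2⟩ := v'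
  simp [pvKeyV, Prod.Lex.toLex_le_toLex] at h
  simp [pvPKey, pvKey4, pvEmb, Prod.Lex.toLex_le_toLex]
  omega

theorem pv_pkey_le_lt (k k' v v') (h : pvKeyK k < pvKeyK k') :
    pvPKey (k, v) ≤ pvPKey (k', v') := by
  obtain ⟨k1, k2⟩ := k; obtain ⟨l1, l2⟩ := k'
  obtain ⟨v1, v2⟩ := v; obtain ⟨w1, w2⟩ := v'
  simp [pvKeyK, Prod.Lex.toLex_lt_toLex] at h
  simp [pvPKey, pvKey4, pvEmb, Prod.Lex.toLex_le_toLex]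
  omega

theorem pv_keyK_lt_of_le_ne {a b : Int × Int} (hle : pvKeyK a ≤ pvKeyK b) (hne : a ≠ b) :
    pvKeyK a < pvKeyK b := by
  rcases lt_or_eq_of_le hle with h | h
  · exact h
  · exact absurd (toLex_inj.1 h) hne

-- ---- the sorted key list ----
theorem pv_SK_perm (P : List ((Int × Int) × (Int × Int))) :
    (pvSK P).Perm (PySem.Set.ofList (P.map (fun p => p.1))) :=
  PySem.List.sorted_perm _ _ _

theorem pv_SK_nodup (P : List ((Int × Int) × (Int × Int))) : (pvSK P).Nodup :=
  ((pv_SK_perm P).symm).nodup (PySem.Set.nodup_ofList _)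

theorem pv_SK_pairwise (P : List ((Int × Int) × (Int × Int))) :
    (pvSK P).Pairwise (fun a b => pvKeyK a < pvKeyK b) := by
  have h1 : (pvSK P).Pairwise (fun a b => pvKeyK a ≤ pvKeyK b) :=
    PySem.List.sorted_pairwise _ _
  have h2 : (pvSK P).Pairwise (fun a b : Int × Int => a ≠ b) := pv_SK_nodup P
  exact (h1.and h2).imp (fun h => pv_keyK_lt_of_le_ne h.1 h.2)

theorem pv_mem_SK (P : List ((Int × Int) × (Int × Int))) (k : Int × Int) :
    k ∈ pvSK P ↔ k ∈ P.map (fun p => p.1) := by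
  rw [pvSK, PySem.List.mem_sorted, PySem.Set.mem_ofList]

-- ---- reattaching keys to a fiber ----
theorem pv_reattach (P : List ((Int × Int) × (Int × Int))) (k : Int × Int) :
    (pvFiber P k).map (fun v => (k, v)) = P.filter (fun p => p.1 == k) := by
  simp only [pvFiber, List.map_map]
  have : ∀ p ∈ P.filter (fun p => p.1 == k), ((fun v => (k, v)) ∘ fun p => p.2) p = id p := by
    intro p hp
    rw [List.mem_filter] at hp
    have : p.1 = k := by simpa using hp.2
    simp [← this]
  rw [List.map_congr_left this, List.map_id]

-- ---- the one sort of B is A's group-and-sort, flattened ----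
theorem pv_sortedP (P : List ((Int × Int) × (Int × Int))) :
    PySem.List.sorted P pvPKey = (pvGS P).flatMap (fun g => g.2.map (fun v => (g.1, v))) := by
  apply PySem.List.eq_of_perm_of_pairwise_le_of_injective pvPKey pv_pkey_inj
  · -- permutation
    refine (PySem.List.sorted_perm _ _ _).trans ?_
    apply List.Perm.symm
    have h1 : (pvGS P).flatMap (fun g => g.2.map (fun v => (g.1, v)))
        = (pvSK P).flatMap (fun k => (PySem.List.sorted (pvFiber P k) pvKeyV).map (fun v => (k, v))) := by
      simp [pvGS, List.flatMap_map]
    rw [h1]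
    have h2 : ((pvSK P).flatMap (fun k => (PySem.List.sorted (pvFiber P k) pvKeyV).map (fun v => (k, v)))).Perm
        ((pvSK P).flatMap (fun k => (pvFiber P k).map (fun v => (k, v)))) := by
      exact List.Perm.flatMap (List.Perm.refl _)
        (fun k _ => (PySem.List.sorted_perm _ _ _).map _)
    refine h2.trans ?_
    have h3 : (pvSK P).flatMap (fun k => (pvFiber P k).map (fun v => (k, v)))
        = (pvSK P).flatMap (fun k => P.filter (fun p => p.1 == k)) := by
      apply List.flatMap_congr
      intro k _
      exact pv_reattach P k
    rw [h3]
    exact pv_perm_partition (pvSK P) P (pv_SK_nodup P)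
      (fun p hp => (pv_mem_SK P p.1).2 (List.mem_map_of_mem hp))
  · exact PySem.List.sorted_pairwise _ _
  · -- the flattened grouping is pairwise ≤ on the full lex key
    rw [List.flatMap_def, List.pairwise_flatten]
    constructor
    · intro l hl
      simp only [List.mem_map, pvGS] at hl
      obtain ⟨g, ⟨k, hk, rfl⟩, rfl⟩ := hl
      rw [List.pairwise_map]
      dsimp only
      exact (PySem.List.sorted_pairwise (pvFiber P k) pvKeyV).imp
        (fun {a b} h => pv_pkey_le_same k a b h)
    · rw [List.pairwise_map]
      have hpw : (pvGS P).Pairwise (fun a b => pvKeyK a.1 < pvKeyK b.1) := by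
        rw [pvGS, List.pairwise_map]
        exact pv_SK_pairwise P
      exact hpw.imp (fun {a b} h => by
        intro x hx y hy
        obtain ⟨v, _, rfl⟩ := List.mem_map.1 hx
        obtain ⟨w, _, rfl⟩ := List.mem_map.1 hy
        exact pv_pkey_le_lt _ _ _ _ h)

-- ---- the two output loops, as recursions ----
theorem pv_piece_eta :
    (fun p : Int × Int => PySem.Int.toStr p.1 ++ ": " ++ PySem.Int.toStr p.2) = pvPiece := rfl

theorem pv_stepA_new (lines : List String) (checked : List Int)
    (g : (Int × Int) × List (Int × Int)) (h : ¬ g.1.1 ∈ checked) :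
    pvStepA (lines, checked) g
      = (lines ++ [PySem.Int.toStr g.1.1 ++ " -> " ++ PySem.Int.toStr g.1.2 ++ ": [ "
          ++ pvInside (PySem.List.sorted2 g.2 (fun p => p.1) (fun p => p.2)) ++ " ]"],
         checked ++ [g.1.1]) := by
  simp [pvStepA, h, pvInside, pv_piece_eta]

theorem pv_stepA_old (lines : List String) (checked : List Int)
    (g : (Int × Int) × List (Int × Int)) (h : g.1.1 ∈ checked) :
    pvStepA (lines, checked) g
      = (lines ++ ["-> " ++ PySem.Int.toStr g.1.2 ++ ": [ "
          ++ pvInside (PySem.List.sorted2 g.2 (fun p => p.1) (fun p => p.2)) ++ " ]"],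
         checked) := by
  simp [pvStepA, h, pvInside, pv_piece_eta]

theorem pv_genA_cons_new (checked : List Int) (g : (Int × Int) × List (Int × Int))
    (rest : List ((Int × Int) × List (Int × Int))) (h : ¬ g.1.1 ∈ checked) :
    pvGenA checked (g :: rest)
      = (PySem.Int.toStr g.1.1 ++ " -> " ++ PySem.Int.toStr g.1.2 ++ ": [ "
          ++ pvInside g.2 ++ " ]") :: pvGenA (checked ++ [g.1.1]) rest := by
  simp [pvGenA, h]

theorem pv_genA_cons_old (checked : List Int) (g : (Int × Int) × List (Int × Int))
    (rest : List ((Int × Int) × List (Int × Int))) (h : g.1.1 ∈ checked) :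
    pvGenA checked (g :: rest)
      = ("-> " ++ PySem.Int.toStr g.1.2 ++ ": [ " ++ pvInside g.2 ++ " ]")
          :: pvGenA checked rest := by
  simp [pvGenA, h]

theorem pv_foldA_lines :
    ∀ (GS : List ((Int × Int) × List (Int × Int))) (lines : List String) (checked : List Int),
      (GS.foldl pvStepA (lines, checked)).1
      = lines ++ pvGenA checked
          (GS.map (fun g => (g.1, PySem.List.sorted2 g.2 (fun p => p.1) (fun p => p.2)))) := by
  intro GS
  induction GS with
  | nil => intro lines checked; simp [pvGenA]
  | cons g rest ih =>
    intro lines checked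
    rw [List.foldl_cons, List.map_cons]
    by_cases h : g.1.1 ∈ checked
    · rw [pv_stepA_old _ _ _ h, ih]
      simp [pvGenA, h, List.append_assoc]
    · rw [pv_stepA_new _ _ _ h, ih]
      simp [pvGenA, h, List.append_assoc]

theorem pv_foldB_parts :
    ∀ (qs : List (Int × Int × Int × Int)) (parts : List String) (prev : Option (Int × Int)),
      (qs.foldl pvStepB (parts, prev)).1 = parts ++ pvGenB prev qs := by
  intro qs
  induction qs with
  | nil => intro parts prev; simp [pvGenB]
  | cons q rest ih =>
    intro parts prev
    rw [List.foldl_cons]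
    have hstep : pvStepB (parts, prev) q
        = (parts ++ [(pvGenB prev [q]).headI], some (q.1, q.2.1)) := by
      cases prev <;> simp [pvStepB, pvGenB, pvPiece]
    rw [hstep, ih]
    have hgen : pvGenB prev (q :: rest)
        = (pvGenB prev [q]).headI :: pvGenB (some (q.1, q.2.1)) rest := by
      cases prev <;> simp [pvGenB]
    rw [hgen, List.append_assoc]
    rfl

-- ---- generation facts ----
theorem pv_genA_ne_nil (checked : List Int) (GS : List ((Int × Int) × List (Int × Int)))
    (h : GS ≠ []) : pvGenA checked GS ≠ [] := by
  cases GS with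
  | nil => exact absurd rfl h
  | cons g rest =>
    by_cases hc : g.1.1 ∈ checked <;> simp [pvGenA, hc]

theorem pv_join_cons' (s a : String) (l : List String) (h : l ≠ []) :
    PySem.Str.join s (a :: l) = a ++ s ++ PySem.Str.join s l := by
  cases l with
  | nil => exact absurd rfl h
  | cons b t => exact pv_join_cons s a b t

theorem pv_genB_block (k : Int × Int) :
    ∀ (vs : List (Int × Int)) (rest : List (Int × Int × Int × Int)),
      pvGenB (some k) (vs.map (fun v => (k.1, k.2, v.1, v.2)) ++ rest)
        = vs.map (fun v => " , " ++ pvPiece v) ++ pvGenB (some k) rest := by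
  intro vs
  induction vs with
  | nil => intro rest; simp
  | cons v t ih =>
    intro rest
    simp only [List.map_cons, List.cons_append, pvGenB]
    rw [if_pos (by simp)]
    simp [ih, pvPiece]

theorem pv_inside_expand :
    ∀ (vs : List (Int × Int)) (v0 : Int × Int),
      pvInside (v0 :: vs)
        = pvPiece v0 ++ PySem.Str.join "" (vs.map (fun v => " , " ++ pvPiece v)) := by
  intro vs
  induction vs with
  | nil => intro v0; simp [pvInside, pv_join_singleton, pv_join_nil]
  | cons v1 t ih =>
    intro v0
    have h1 : pvInside (v0 :: v1 :: t) = pvPiece v0 ++ " , " ++ pvInside (v1 :: t) := by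
      simp only [pvInside, List.map_cons]
      exact pv_join_cons _ _ _ _
    rw [h1, ih v1, List.map_cons, pv_join_empty_cons]
    simp [String.append_assoc]

theorem pv_keyK_le_fst {a b : Int × Int} (h : pvKeyK a < pvKeyK b) : a.1 ≤ b.1 := by
  obtain ⟨a1, a2⟩ := a; obtain ⟨b1, b2⟩ := b
  simp [pvKeyK, Prod.Lex.toLex_lt_toLex] at h
  omega

-- the streaming render of the flattened groups, against A's per-group lines
theorem pv_render_rest :
    ∀ (GS : List ((Int × Int) × List (Int × Int))) (p : Int × Int) (checked : List Int),
      ((p :: GS.map (fun g => g.1)).Pairwise (fun a b => pvKeyK a < pvKeyK b)) →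
      (∀ g ∈ GS, g.2 ≠ []) →
      p.1 ∈ checked → (∀ x ∈ checked, x ≤ p.1) →
      PySem.Str.join "" (pvGenB (some p) (pvFlat GS)) ++ " ]"
        = (if GS = [] then " ]" else " ]\n" ++ PySem.Str.join "\n" (pvGenA checked GS)) := by
  intro GS
  induction GS with
  | nil => intro p checked _ _ _ _; simp [pvFlat, pvGenB, pv_join_nil]
  | cons g rest ih =>
    intro p checked hpw hne hmem hbd
    obtain ⟨k, its⟩ := g
    obtain ⟨v0, vs, rfl⟩ : ∃ v0 vs, its = v0 :: vs := by
      cases its with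
      | nil => exact absurd rfl (hne (k, []) (by simp))
      | cons a b => exact ⟨a, b, rfl⟩
    have hpk : pvKeyK p < pvKeyK k := (List.pairwise_cons.1 hpw).1 k (by simp)
    have hpne : p ≠ k := by rintro rfl; exact lt_irrefl _ hpk
    have hflat : pvFlat ((k, v0 :: vs) :: rest)
        = (k.1, k.2, v0.1, v0.2) :: (vs.map (fun v => (k.1, k.2, v.1, v.2)) ++ pvFlat rest) := by
      simp [pvFlat]
    rw [hflat]
    simp only [pvGenB]
    rw [if_neg (fun h : p = (k.1, k.2) => hpne (by simpa using h))]
    simp only [Prod.mk.eta]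
    rw [pv_genB_block k vs (pvFlat rest), pv_join_empty_cons, pv_join_empty_append]
    rw [if_neg (show ¬((k, v0 :: vs) :: rest = []) by simp)]
    have hpw' : (k :: rest.map (fun g => g.1)).Pairwise (fun a b => pvKeyK a < pvKeyK b) := by
      have := List.pairwise_cons.1 hpw
      simpa using this.2
    have hne' : ∀ g ∈ rest, g.2 ≠ [] := fun g hg => hne g (by simp [hg])
    by_cases hik : p.1 = k.1
    · -- same i as the previous group: continuation line on both sides
      have hmemk : (k, v0 :: vs).1.1 ∈ checked := by
        show k.1 ∈ checked; rw [← hik]; exact hmem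
      rw [pv_genA_cons_old _ _ _ hmemk, if_pos hik]
      have hbd' : ∀ x ∈ checked, x ≤ k.1 := fun x hx => le_of_le_of_eq (hbd x hx) hik
      have ihh := ih k checked hpw' hne' hmemk hbd'
      rcases eq_or_ne rest [] with rfl | hrne
      · rw [show pvGenB (some k) (pvFlat []) = [] from rfl, pv_join_nil,
          show pvGenA checked ([] : List ((Int × Int) × List (Int × Int))) = [] from rfl,
          pv_join_singleton, pv_inside_expand vs v0]
        apply String.ext
        simp [String.toList_append]
      · rw [if_neg hrne] at ihh
        rw [pv_join_cons' _ _ _ (pv_genA_ne_nil checked rest hrne), pv_inside_expand vs v0]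
        simp only [String.append_assoc]
        rw [ihh]
        apply String.ext
        simp [String.toList_append]
    · -- a new i: full header on both sides
      have hmemk : ¬ (k, v0 :: vs).1.1 ∈ checked := by
        show ¬ k.1 ∈ checked
        intro hk
        exact hik (le_antisymm (hbd _ hk) (pv_keyK_le_fst hpk)).symm
      rw [pv_genA_cons_new _ _ _ hmemk, if_neg hik]
      have hbd' : ∀ x ∈ checked ++ [k.1], x ≤ k.1 := by
        intro x hx
        rcases List.mem_append.1 hx with hx | hx
        · exact le_trans (hbd x hx) (pv_keyK_le_fst hpk)
        · simp at hx; omega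
      have ihh := ih k (checked ++ [k.1]) hpw' hne' (by simp) hbd'
      rcases eq_or_ne rest [] with rfl | hrne
      · rw [show pvGenB (some k) (pvFlat []) = [] from rfl, pv_join_nil,
          show pvGenA (checked ++ [k.1]) ([] : List ((Int × Int) × List (Int × Int))) = [] from rfl,
          pv_join_singleton, pv_inside_expand vs v0]
        apply String.ext
        simp [String.toList_append]
      · rw [if_neg hrne] at ihh
        rw [pv_join_cons' _ _ _ (pv_genA_ne_nil (checked ++ [k.1]) rest hrne),
          pv_inside_expand vs v0]
        simp only [String.append_assoc]
        rw [ihh]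
        apply String.ext
        simp [String.toList_append]

theorem pv_render_main :
    ∀ (GS : List ((Int × Int) × List (Int × Int))),
      GS ≠ [] →
      (GS.map (fun g => g.1)).Pairwise (fun a b => pvKeyK a < pvKeyK b) →
      (∀ g ∈ GS, g.2 ≠ []) →
      PySem.Str.join "\n" (pvGenA [] GS)
        = PySem.Str.join "" (pvGenB none (pvFlat GS)) ++ " ]" := by
  intro GS h0 hpw hne
  cases GS with
  | nil => exact absurd rfl h0
  | cons g rest =>
    obtain ⟨k, its⟩ := g
    obtain ⟨v0, vs, rfl⟩ : ∃ v0 vs, its = v0 :: vs := by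
      cases its with
      | nil => exact absurd rfl (hne (k, []) (by simp))
      | cons a b => exact ⟨a, b, rfl⟩
    have hflat : pvFlat ((k, v0 :: vs) :: rest)
        = (k.1, k.2, v0.1, v0.2) :: (vs.map (fun v => (k.1, k.2, v.1, v.2)) ++ pvFlat rest) := by
      simp [pvFlat]
    rw [hflat]
    simp only [pvGenB, Prod.mk.eta]
    rw [pv_genB_block k vs (pvFlat rest), pv_join_empty_cons, pv_join_empty_append]
    rw [pv_genA_cons_new [] (k, v0 :: vs) rest (by simp)]
    have hpw' : (k :: rest.map (fun g => g.1)).Pairwise (fun a b => pvKeyK a < pvKeyK b) := by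
      simpa using hpw
    have hne' : ∀ g ∈ rest, g.2 ≠ [] := fun g hg => hne g (by simp [hg])
    rcases eq_or_ne rest [] with rfl | hrne
    · rw [show pvGenB (some k) (pvFlat []) = [] from rfl, pv_join_nil,
        show pvGenA ([] ++ [k.1]) ([] : List ((Int × Int) × List (Int × Int))) = [] from rfl,
        pv_join_singleton, pv_inside_expand vs v0]
      apply String.ext
      simp [String.toList_append]
    · have ihh := pv_render_rest rest k ([] ++ [k.1]) hpw' hne' (by simp) (by simp)
      rw [if_neg hrne] at ihh
      rw [pv_join_cons' _ _ _ (pv_genA_ne_nil ([] ++ [k.1]) rest hrne), pv_inside_expand vs v0]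
      simp only [String.append_assoc]
      rw [ihh]
      apply String.ext
      simp [String.toList_append]

theorem pv_fiber_ne_nil (P : List ((Int × Int) × (Int × Int))) (k : Int × Int)
    (h : k ∈ P.map (fun p => p.1)) : pvFiber P k ≠ [] := by
  obtain ⟨p, hp, rfl⟩ := List.mem_map.1 h
  intro hnil
  have hmem : p ∈ P.filter (fun q => q.1 == p.1) := List.mem_filter.2 ⟨hp, by simp⟩
  simp only [pvFiber, List.map_eq_nil_iff] at hnil
  rw [hnil] at hmem
  exact absurd hmem (List.not_mem_nil)

theorem pv_flat_eq (GS : List ((Int × Int) × List (Int × Int))) :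
    (GS.flatMap (fun g => g.2.map (fun v => (g.1, v)))).map pvEmb = pvFlat GS := by
  simp [pvFlat, List.map_flatMap, List.map_map]
  rfl

theorem pv_main : ∀ (ed : List (String × Int)), fmt_edges ed = fmt_edges_alt ed := by
  intro ed
  simp only [fmt_edges, fmt_edges_alt]
  rw [pv_foldA_dict ed PySem.Dict.empty, pv_grouped_items ed, pv_quads ed]
  by_cases hP : pvP ed = []
  · rw [if_pos (by simp [hP, show PySem.Set.ofList ([] : List (Int × Int)) = [] from rfl]),
      if_pos (by simp [hP, show PySem.List.sorted ([] : List (Int × Int × Int × Int)) pvKey4 = [] from rfl])]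
  · have hK0 : ¬ PySem.Set.ofList ((pvP ed).map (fun p => p.1)) = [] := by
      rw [pv_ofList_eq_nil]
      simp [hP]
    rw [if_neg (by simp [hK0]),
      if_neg (by rw [PySem.List.sorted_eq_nil_iff]; simp [hP])]
    rw [pv_foldA_lines, pv_foldB_parts]
    simp only [List.nil_append]
    -- A's sorted group list, inner lists sorted, is exactly pvGS
    have hG : ((PySem.List.sorted2
          ((PySem.Set.ofList ((pvP ed).map (fun p => p.1))).map (fun k => (k, pvFiber (pvP ed) k)))
          (fun g => g.1.1) (fun g => g.1.2)).map
            (fun g => (g.1, PySem.List.sorted2 g.2 (fun p => p.1) (fun p => p.2))))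
        = pvGS (pvP ed) := by
      rw [pv_sorted2_eq_sorted]
      rw [pv_sorted_map (fun k => (k, pvFiber (pvP ed) k))
        (fun g => toLex (g.1.1, g.1.2))
        (PySem.Set.ofList ((pvP ed).map (fun p => p.1)))]
      rw [List.map_map]
      rw [show (fun k : Int × Int => toLex ((k, pvFiber (pvP ed) k).1.1, (k, pvFiber (pvP ed) k).1.2)) = pvKeyK from rfl]
      simp only [pvGS, pvSK]
      apply List.map_congr_left
      intro k _
      simp only [Function.comp]
      rw [pv_sorted2_eq_sorted]
      rfl
    rw [hG]
    -- B's sorted quads are the flattened pvGS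
    have hQ : PySem.List.sorted ((pvP ed).map pvEmb) pvKey4 = pvFlat (pvGS (pvP ed)) := by
      rw [pv_sorted_map pvEmb pvKey4 (pvP ed)]
      rw [show (fun p => pvKey4 (pvEmb p)) = pvPKey from rfl]
      rw [pv_sortedP, pv_flat_eq]
    rw [hQ]
    -- hypotheses of the render equivalence
    have hSKne : pvSK (pvP ed) ≠ [] := by
      rw [pvSK, Ne, PySem.List.sorted_eq_nil_iff]
      exact hK0
    apply pv_render_main
    · simp only [pvGS, Ne, List.map_eq_nil_iff]
      exact hSKne
    · rw [pvGS, List.map_map]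
      rw [show ((fun g : (Int × Int) × List (Int × Int) => g.1) ∘
        (fun k => (k, PySem.List.sorted (pvFiber (pvP ed) k) pvKeyV))) = id from rfl]
      rw [List.map_id]
      exact pv_SK_pairwise (pvP ed)
    · intro g hg
      simp only [pvGS, List.mem_map] at hg
      obtain ⟨k, hk, rfl⟩ := hg
      simp only [Ne, PySem.List.sorted_eq_nil_iff]
      exact pv_fiber_ne_nil (pvP ed) k ((pv_mem_SK (pvP ed) k).1 hk)

-- ===== VERDICT (by name: the statement is the Claim_ definition above) =====
theorem fmt_edges_spec : Claim_equal_fmt_edges := by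
  intro ed _
  unfold Spec_fmt_edges
  exact pv_main ed
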